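-- pv_equiv track=rewrite | github.com/x0wllaar/AdventOfCode2024 | Day9/part2.py | find_last_file_extent
-- ===== SOURCE A (Python) =====
-- def find_last_file_extent(blocks, ptr):
--     end = None
--     file = None
--     for i in range(ptr, -1, -1):
--         if blocks[i] is not None and end is None:
--             end = i
--             file = blocks[i]
--         if blocks[i] == file and end is not None:
--             start = i
--         if blocks[i] != file and end is not None:
--             return start, end, file
--     return -1, -1, -1
-- ===== SOURCE B (Python) =====
-- def find_last_file_extent(blocks, ptr):
--     if ptr < 0:
--         return -1, -1, -1
--     # Run-length encode blocks[:ptr+1] in one forward pass: (value, start, end) per run.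
--     runs = []
--     for idx in range(ptr + 1):
--         v = blocks[idx]
--         if runs and runs[-1][0] == v:
--             val, s, _ = runs[-1]
--             runs[-1] = (val, s, idx)
--         else:
--             runs.append((v, idx, idx))
--     # Drop trailing free-space runs, then read off the last file's run.
--     while runs and runs[-1][0] is None:
--         runs.pop()
--     if not runs:
--         return -1, -1, -1
--     v, s, e = runs[-1]
--     return s, e, v
-- ===== Notes on version B (the rewrite author's own statement) =====
-- stated objective: alternative
-- what changed: A's backward stateful scan (end/file/start tracked across three interleaved conditionals with an early return) is replaced by a forward run-length encoding of blocks[:ptr+1]; trailing free-space runs are dropped and the answer is read off the last run.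
-- intended difference: When the last file's contiguous run extends down to index 0 (the prefix blocks[:ptr+1] is a constant non-None run followed only by Nones), A falls off its loop without returning and yields (-1, -1, -1); B returns the actual extent (0, end, file), which is the intended result of finding the last file's extent. — e.g. on find_last_file_extent([some 5, some 5, none], 2): A returns (-1, -1, -1), B returns (0, 1, 5)
import Mathlib
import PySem

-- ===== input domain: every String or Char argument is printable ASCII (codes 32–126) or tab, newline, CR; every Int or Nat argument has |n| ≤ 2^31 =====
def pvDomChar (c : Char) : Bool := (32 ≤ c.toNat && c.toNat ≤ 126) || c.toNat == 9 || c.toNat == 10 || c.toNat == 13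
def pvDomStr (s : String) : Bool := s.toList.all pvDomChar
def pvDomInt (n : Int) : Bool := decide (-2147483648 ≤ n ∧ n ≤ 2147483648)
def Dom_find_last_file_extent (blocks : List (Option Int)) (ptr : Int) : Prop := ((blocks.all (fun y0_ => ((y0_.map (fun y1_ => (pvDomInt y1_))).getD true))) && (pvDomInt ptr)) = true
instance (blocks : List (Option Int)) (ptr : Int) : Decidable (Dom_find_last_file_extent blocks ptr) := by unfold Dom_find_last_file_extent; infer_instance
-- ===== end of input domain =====

-- B replaces A's backward stateful scan by a forward run-length encoding of the prefix
-- blocks[:ptr+1]; where the last file's run reaches index 0, A returns (-1,-1,-1) and B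
-- returns the actual extent (stated as the intended difference D_ below).

-- ===== PORT A =====
-- A's for-loop with early return; state (end?, file?, start) exactly as in the Python.
def loopA (blocks : List (Option Int)) :
    List Int → Option Int → Option Int → Int → Int × Int × Int
  | [], _, _, _ => (-1, -1, -1)
  | i :: rest, e, f, s =>
      let b : Option Int := (PySem.List.pyGet? blocks i).getD none
      let e' := if b ≠ none ∧ e = none then some i else e
      let f' := if b ≠ none ∧ e = none then b else f
      let s' := if b = f' ∧ e' ≠ none then i else s
      if b ≠ f' ∧ e' ≠ none then (s', e'.getD (-1), f'.getD (-1))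
      else loopA blocks rest e' f' s'

def find_last_file_extent (blocks : List (Option Int)) (ptr : Int) : Int × Int × Int :=
  loopA blocks (PySem.List.pyRange ptr (-1) (-1)) none none 0

-- ===== PORT B =====
-- the for-loop over range(ptr+1) building `runs`; the accumulator keeps the runs most-recent
-- first, so Python's runs[-1] (inspect/replace last, append) is the head here.
def loopRuns (blocks : List (Option Int)) :
    List Int → List (Option Int × Int × Int) → List (Option Int × Int × Int)
  | [], runs => runs
  | idx :: rest, runs =>
      let v : Option Int := (PySem.List.pyGet? blocks idx).getD none
      let runs' :=
        match runs with
        | (v0, s0, e0) :: tl =>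
            if v0 = v then (v0, s0, idx) :: tl else (v, idx, idx) :: (v0, s0, e0) :: tl
        | [] => [(v, idx, idx)]
      loopRuns blocks rest runs'

def find_last_file_extent_alt (blocks : List (Option Int)) (ptr : Int) : Int × Int × Int :=
  if ptr < 0 then (-1, -1, -1)
  else
    let runs := loopRuns blocks (PySem.List.pyRange 0 (ptr + 1) 1) []
    -- while runs and runs[-1][0] is None: runs.pop()
    let runs2 := runs.dropWhile (fun r => r.1.isNone)
    match runs2 with
    | [] => (-1, -1, -1)
    | (v, s, e) :: _ => (s, e, v.getD (-1))

-- ===== PRECONDITION & SPEC =====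
-- Pre_ excludes exactly the inputs where the Python A raises IndexError: ptr ≥ len(blocks)
-- (B raises there too).
def Pre_find_last_file_extent (blocks : List (Option Int)) (ptr : Int) : Prop :=
  ptr < (blocks.length : Int)
instance (blocks : List (Option Int)) (ptr : Int) : Decidable (Pre_find_last_file_extent blocks ptr) := by unfold Pre_find_last_file_extent; infer_instance

def pvWitness_find_last_file_extent : List (Option Int) × Int := ([some 7, none, some 3, some 3], 3)

-- When the last file's contiguous run extends down to index 0 (the prefix blocks[:ptr+1] is a
-- constant non-None run followed only by Nones), A falls off its loop and returns (-1,-1,-1);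
-- B returns the actual extent (0, end, file), the intended result of the function.
def D_find_last_file_extent (blocks : List (Option Int)) (ptr : Int) : Prop :=
  0 ≤ ptr ∧ ptr < (blocks.length : Int) ∧
    ∃ k ∈ List.range (ptr + 1).toNat,
      blocks.getD k none ≠ none ∧
      (∀ j ∈ List.range (k + 1), blocks.getD j none = blocks.getD k none) ∧
      (∀ j ∈ List.range (ptr + 1).toNat, k < j → blocks.getD j none = none)
instance (blocks : List (Option Int)) (ptr : Int) : Decidable (D_find_last_file_extent blocks ptr) := by unfold D_find_last_file_extent; infer_instance

def Spec_find_last_file_extent (blocks : List (Option Int)) (ptr : Int) (out : Int × Int × Int) : Prop := ¬ D_find_last_file_extent blocks ptr → out = find_last_file_extent_alt blocks ptr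
instance (blocks : List (Option Int)) (ptr : Int) (out : Int × Int × Int) : Decidable (Spec_find_last_file_extent blocks ptr out) := by unfold Spec_find_last_file_extent; infer_instance

def pvDiffWitness_find_last_file_extent : List (Option Int) × Int := ([some 5, some 5, none], 2)
def pvDiffWitnessOut_find_last_file_extent : (Int × Int × Int) × (Int × Int × Int) :=
  ((-1, -1, -1), (0, 1, 5))

-- ===== CLAIM (what is proved, stated in full; the proofs are below) =====
def Claim_unchanged_find_last_file_extent : Prop := ∀ (blocks : List (Option Int)) (ptr : Int), Dom_find_last_file_extent blocks ptr → Pre_find_last_file_extent blocks ptr → Spec_find_last_file_extent blocks ptr (find_last_file_extent blocks ptr)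
def Claim_changed_find_last_file_extent : Prop := Dom_find_last_file_extent (pvDiffWitness_find_last_file_extent.1) (pvDiffWitness_find_last_file_extent.2) ∧ Pre_find_last_file_extent (pvDiffWitness_find_last_file_extent.1) (pvDiffWitness_find_last_file_extent.2) ∧ D_find_last_file_extent (pvDiffWitness_find_last_file_extent.1) (pvDiffWitness_find_last_file_extent.2) ∧ find_last_file_extent (pvDiffWitness_find_last_file_extent.1) (pvDiffWitness_find_last_file_extent.2) = pvDiffWitnessOut_find_last_file_extent.1 ∧ find_last_file_extent_alt (pvDiffWitness_find_last_file_extent.1) (pvDiffWitness_find_last_file_extent.2) = pvDiffWitnessOut_find_last_file_extent.2 ∧ pvDiffWitnessOut_find_last_file_extent.1 ≠ pvDiffWitnessOut_find_last_file_extent.2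
def Claim_exact_find_last_file_extent : Prop := ∀ (blocks : List (Option Int)) (ptr : Int), Dom_find_last_file_extent blocks ptr → Pre_find_last_file_extent blocks ptr → D_find_last_file_extent blocks ptr → find_last_file_extent blocks ptr ≠ find_last_file_extent_alt blocks ptr

-- ===== LEMMAS AND PROOFS =====

-- reference walks used only by the proofs: last non-empty index, and run start
def loopB1 (blocks : List (Option Int)) (i : Int) : Int :=
  if h : 0 ≤ i ∧ (PySem.List.pyGet? blocks i).getD none = none then loopB1 blocks (i - 1)
  else i
termination_by (i + 1).toNat
decreasing_by omega

def loopB2 (blocks : List (Option Int)) (file : Option Int) (i : Int) : Int :=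
  if h : 0 ≤ i ∧ (PySem.List.pyGet? blocks i).getD none = file then loopB2 blocks file (i - 1)
  else i
termination_by (i + 1).toNat
decreasing_by omega

-- the two-phase reference A reduces to (with A's fall-off-at-0 quirk)
def refA (blocks : List (Option Int)) (ptr : Int) : Int × Int × Int :=
  let i1 := loopB1 blocks ptr
  if i1 < 0 then (-1, -1, -1)
  else
    let e := i1
    let f : Option Int := (PySem.List.pyGet? blocks e).getD none
    let i2 := loopB2 blocks f i1
    if i2 < 0 then (-1, -1, -1)
    else (i2 + 1, e, f.getD (-1))

-- the same reference without the quirk branch: B reduces to this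
def refB (blocks : List (Option Int)) (ptr : Int) : Int × Int × Int :=
  let i1 := loopB1 blocks ptr
  if i1 < 0 then (-1, -1, -1)
  else
    let f : Option Int := (PySem.List.pyGet? blocks i1).getD none
    (loopB2 blocks f i1 + 1, i1, f.getD (-1))

theorem loopB2_le (blocks : List (Option Int)) (f : Option Int) (i : Int) :
    loopB2 blocks f i ≤ i := by
  rw [loopB2]
  split
  · exact le_trans (loopB2_le blocks f (i - 1)) (by omega)
  · exact le_refl i
termination_by (i + 1).toNat
decreasing_by omega

theorem loopB2_ge (blocks : List (Option Int)) (f : Option Int) (i : Int) (hi : -1 ≤ i) :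
    -1 ≤ loopB2 blocks f i := by
  rw [loopB2]
  split
  · next h => exact loopB2_ge blocks f (i - 1) (by omega)
  · exact hi
termination_by (i + 1).toNat
decreasing_by omega

theorem loopB2_mem (blocks : List (Option Int)) (f : Option Int) (i : Int) :
    ∀ k, loopB2 blocks f i < k → k ≤ i → (PySem.List.pyGet? blocks k).getD none = f := by
  rw [loopB2]
  split
  · next h =>
      intro k h1 h2
      by_cases hk : k = i
      · rw [hk]; exact h.2
      · exact loopB2_mem blocks f (i - 1) k h1 (by omega)
  · intro k h1 h2; omega
termination_by (i + 1).toNat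
decreasing_by omega

theorem loopB2_stop (blocks : List (Option Int)) (f : Option Int) (i : Int)
    (h0 : 0 ≤ loopB2 blocks f i) :
    (PySem.List.pyGet? blocks (loopB2 blocks f i)).getD none ≠ f := by
  by_cases h : 0 ≤ i ∧ (PySem.List.pyGet? blocks i).getD none = f
  · have hrw : loopB2 blocks f i = loopB2 blocks f (i - 1) := by rw [loopB2]; exact dif_pos h
    rw [hrw] at h0 ⊢
    exact loopB2_stop blocks f (i - 1) h0
  · have hrw : loopB2 blocks f i = i := by rw [loopB2]; exact dif_neg h
    rw [hrw] at h0 ⊢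
    intro hc
    exact h ⟨h0, hc⟩
termination_by (i + 1).toNat
decreasing_by omega

theorem loopB2_eq_of (blocks : List (Option Int)) (f : Option Int) (i c : Int)
    (hc : -1 ≤ c) (hci : c ≤ i)
    (hrun : ∀ j, c < j → j ≤ i → (PySem.List.pyGet? blocks j).getD none = f)
    (hstop : c = -1 ∨ (PySem.List.pyGet? blocks c).getD none ≠ f) :
    loopB2 blocks f i = c := by
  by_cases hic : i = c
  · subst hic
    rw [loopB2]
    rcases hstop with h | h
    · exact dif_neg (fun hh => by omega)
    · exact dif_neg (fun hh => h hh.2)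
  · have hlt : c < i := by omega
    rw [loopB2, dif_pos ⟨by omega, hrun i hlt le_rfl⟩]
    exact loopB2_eq_of blocks f (i - 1) c hc (by omega)
      (fun j h1 h2 => hrun j h1 (by omega)) hstop
termination_by (i + 1).toNat
decreasing_by omega

-- loopB1 is loopB2 with file = none
theorem loopB1_eq (blocks : List (Option Int)) (i : Int) :
    loopB1 blocks i = loopB2 blocks none i := by
  rw [loopB1, loopB2]
  split
  · next h => exact loopB1_eq blocks (i - 1)
  · rfl
termination_by (i + 1).toNat
decreasing_by omega

-- ===== A = refA (A's loop in two phases) =====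

theorem loopA_neg (blocks : List (Option Int)) (i : Int) (hi : i < 0)
    (e f : Option Int) (s : Int) :
    loopA blocks (PySem.List.pyRange i (-1) (-1)) e f s = (-1, -1, -1) := by
  rw [PySem.List.pyRange_neg_one_eq_nil (by omega)]
  simp [loopA]

theorem refA_neg (blocks : List (Option Int)) (i : Int) (hi : i < 0) :
    refA blocks i = (-1, -1, -1) := by
  unfold refA
  have h1 : loopB1 blocks i = i := by rw [loopB1]; exact dif_neg (fun h => absurd h.1 (by omega))
  simp only [h1]
  rw [if_pos hi]

theorem refA_none (blocks : List (Option Int)) (i : Int) (hi0 : 0 ≤ i)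
    (hb : (PySem.List.pyGet? blocks i).getD none = none) :
    refA blocks i = refA blocks (i - 1) := by
  unfold refA
  have h1 : loopB1 blocks i = loopB1 blocks (i - 1) := by
    conv_lhs => rw [loopB1]
    exact dif_pos ⟨hi0, hb⟩
  rw [h1]

theorem refA_found (blocks : List (Option Int)) (i v : Int) (hi0 : 0 ≤ i)
    (hv : (PySem.List.pyGet? blocks i).getD none = some v) :
    refA blocks i =
      (if loopB2 blocks (some v) (i - 1) < 0 then (-1, -1, -1)
       else (loopB2 blocks (some v) (i - 1) + 1, i, v)) := by
  unfold refA
  have h1 : loopB1 blocks i = i := by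
    rw [loopB1]; exact dif_neg (fun h => by rw [hv] at h; exact absurd h.2 (by simp))
  have h2 : loopB2 blocks (some v) i = loopB2 blocks (some v) (i - 1) := by
    conv_lhs => rw [loopB2]
    exact dif_pos ⟨hi0, hv⟩
  simp only [h1, hv, h2, Option.getD_some]
  rw [if_neg (by omega)]

theorem phase2 (blocks : List (Option Int)) (n : Nat) (i : Int) (hi : i < (n : Int))
    (s E : Int) (F : Int) :
    loopA blocks (PySem.List.pyRange i (-1) (-1)) (some E) (some F) s =
      (if loopB2 blocks (some F) i < 0 then (-1, -1, -1)
       else ((if loopB2 blocks (some F) i = i then s else loopB2 blocks (some F) i + 1), E, F)) := by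
  induction n generalizing i s with
  | zero =>
      rw [loopA_neg blocks i (by omega)]
      rw [loopB2, dif_neg (fun h => absurd h.1 (by omega))]
      rw [if_pos (by omega)]
  | succ n ih =>
      by_cases h0 : i < 0
      · rw [loopA_neg blocks i h0]
        rw [loopB2, dif_neg (fun h => absurd h.1 (by omega))]
        rw [if_pos (by omega)]
      · have hi0 : (0:Int) ≤ i := by omega
        rw [PySem.List.pyRange_neg_one_cons (show (-1:Int) < i by omega)]
        by_cases hbf : (PySem.List.pyGet? blocks i).getD none = some F
        · have hstep : loopB2 blocks (some F) i = loopB2 blocks (some F) (i - 1) := by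
            conv_lhs => rw [loopB2]
            exact dif_pos ⟨hi0, hbf⟩
          have hj := loopB2_le blocks (some F) (i - 1)
          have hA : loopA blocks (i :: PySem.List.pyRange (i - 1) (-1) (-1)) (some E) (some F) s =
              loopA blocks (PySem.List.pyRange (i - 1) (-1) (-1)) (some E) (some F) i := by
            simp [loopA, hbf]
          rw [hA, ih (i - 1) (by omega) i, hstep]
          set j := loopB2 blocks (some F) (i - 1) with hjdef
          by_cases hj0 : j < 0
          · rw [if_pos hj0, if_pos hj0]
          · rw [if_neg hj0, if_neg hj0, if_neg (show ¬ j = i by omega)]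
            by_cases hji : j = i - 1
            · rw [if_pos hji, hji]; norm_num
            · rw [if_neg hji]
        · have hstep : loopB2 blocks (some F) i = i := by
            rw [loopB2]; exact dif_neg (fun h => hbf h.2)
          have hA : loopA blocks (i :: PySem.List.pyRange (i - 1) (-1) (-1)) (some E) (some F) s =
              (s, E, F) := by
            simp [loopA, hbf]
          rw [hA, hstep, if_neg (by omega), if_pos rfl]

theorem phase1 (blocks : List (Option Int)) (n : Nat) (i : Int) (hi : i < (n : Int)) (s : Int) :
    loopA blocks (PySem.List.pyRange i (-1) (-1)) none none s = refA blocks i := by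
  induction n generalizing i s with
  | zero =>
      rw [loopA_neg blocks i (by omega), refA_neg blocks i (by omega)]
  | succ n ih =>
      by_cases h0 : i < 0
      · rw [loopA_neg blocks i h0, refA_neg blocks i h0]
      · have hi0 : (0:Int) ≤ i := by omega
        rw [PySem.List.pyRange_neg_one_cons (show (-1:Int) < i by omega)]
        by_cases hb : (PySem.List.pyGet? blocks i).getD none = none
        · have hA : loopA blocks (i :: PySem.List.pyRange (i - 1) (-1) (-1)) none none s =
              loopA blocks (PySem.List.pyRange (i - 1) (-1) (-1)) none none s := by
            simp [loopA, hb]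
          rw [hA, ih (i - 1) (by omega) s, ← refA_none blocks i hi0 hb]
        · obtain ⟨v, hv⟩ : ∃ v, (PySem.List.pyGet? blocks i).getD none = some v := by
            cases hx : (PySem.List.pyGet? blocks i).getD none with
            | none => exact absurd hx hb
            | some v => exact ⟨v, rfl⟩
          have hA : loopA blocks (i :: PySem.List.pyRange (i - 1) (-1) (-1)) none none s =
              loopA blocks (PySem.List.pyRange (i - 1) (-1) (-1)) (some i) (some v) i := by
            simp [loopA, hv]
          rw [hA, phase2 blocks n (i - 1) (by omega) i i v,
            refA_found blocks i v hi0 hv]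
          have hj := loopB2_le blocks (some v) (i - 1)
          set j := loopB2 blocks (some v) (i - 1) with hjdef
          by_cases hj0 : j < 0
          · rw [if_pos hj0, if_pos hj0]
          · rw [if_neg hj0, if_neg hj0]
            by_cases hji : j = i - 1
            · rw [if_pos hji, hji]; norm_num
            · rw [if_neg hji]

theorem A_eq_refA (blocks : List (Option Int)) (ptr : Int) :
    find_last_file_extent blocks ptr = refA blocks ptr := by
  unfold find_last_file_extent
  exact phase1 blocks (ptr + 1).toNat ptr (by omega) 0

-- ===== B = refB (the run-length encoding characterised) =====

theorem loopRuns_append (blocks : List (Option Int)) (l1 l2 : List Int)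
    (acc : List (Option Int × Int × Int)) :
    loopRuns blocks (l1 ++ l2) acc = loopRuns blocks l2 (loopRuns blocks l1 acc) := by
  induction l1 generalizing acc with
  | nil => simp [loopRuns]
  | cons x xs ih => simp only [List.cons_append, loopRuns]; exact ih _

-- the head of the run list covers [s, ptr] where s - 1 = loopB2 (blocks[ptr]) ptr,
-- and the tail is the run list of the shorter prefix [0, s)
theorem rle_decomp (blocks : List (Option Int)) (n : Nat) :
    ∀ ptr : Int, 0 ≤ ptr → ptr < (n : Int) →
      loopRuns blocks (PySem.List.pyRange 0 (ptr + 1) 1) [] =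
        ((PySem.List.pyGet? blocks ptr).getD none,
          loopB2 blocks ((PySem.List.pyGet? blocks ptr).getD none) ptr + 1, ptr) ::
        loopRuns blocks
          (PySem.List.pyRange 0 (loopB2 blocks ((PySem.List.pyGet? blocks ptr).getD none) ptr + 1) 1) [] := by
  induction n with
  | zero => intro ptr h1 h2; omega
  | succ n ih =>
      intro ptr h1 h2
      rw [show ptr + 1 = ptr + 1 by rfl, PySem.List.pyRange_one_succ_right (by omega),
        loopRuns_append]
      set v : Option Int := (PySem.List.pyGet? blocks ptr).getD none with hv
      by_cases hp0 : ptr = 0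
      · subst hp0
        have hb2 : loopB2 blocks v 0 = -1 := by
          rw [loopB2, dif_pos ⟨le_rfl, rfl⟩, loopB2]
          exact dif_neg (fun h => by omega)
        simp only [hb2]
        norm_num
        simp [loopRuns]
        exact hv.symm
      · have hprev := ih (ptr - 1) (by omega) (by omega)
        rw [show ptr - 1 + 1 = ptr by ring] at hprev
        set v' : Option Int := (PySem.List.pyGet? blocks (ptr - 1)).getD none with hv'
        have hstep : loopB2 blocks v ptr = loopB2 blocks v (ptr - 1) := by
          conv_lhs => rw [loopB2]
          exact dif_pos ⟨h1, hv.symm⟩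
        rw [hprev]
        by_cases heq : v' = v
        · have hs : loopB2 blocks v (ptr - 1) = loopB2 blocks v' (ptr - 1) := by rw [heq]
          simp only [loopRuns, heq]
          rw [if_pos hv, hstep, hs]
        · have hstop : loopB2 blocks v (ptr - 1) = ptr - 1 := by
            rw [loopB2]
            exact dif_neg (fun h => heq h.2)
          simp only [loopRuns]
          rw [if_neg (fun h => heq (h.trans hv.symm))]
          rw [hstep, hstop, show ptr - 1 + 1 = ptr by ring, hprev, ← hv]

theorem B_eq_refB (blocks : List (Option Int)) (ptr : Int) :
    find_last_file_extent_alt blocks ptr = refB blocks ptr := by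
  by_cases h0 : ptr < 0
  · unfold find_last_file_extent_alt refB
    have h1 : loopB1 blocks ptr = ptr := by
      rw [loopB1]; exact dif_neg (fun h => by omega)
    rw [if_pos h0]
    simp only [h1]
    rw [if_pos h0]
  · have h1 : (0:Int) ≤ ptr := by omega
    unfold find_last_file_extent_alt refB
    rw [if_neg h0]
    dsimp only
    have hdec := rle_decomp blocks (ptr + 1).toNat ptr h1 (by omega)
    set v : Option Int := (PySem.List.pyGet? blocks ptr).getD none with hv
    by_cases hvn : v = none
    · -- blocks[ptr] is empty: the head run is a None run, dropWhile skips it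
      have hb1 : loopB1 blocks ptr = loopB2 blocks v ptr := by
        rw [loopB1_eq, hvn]
      set c := loopB2 blocks v ptr with hc
      have hcge : -1 ≤ c := loopB2_ge blocks v ptr (by omega)
      rw [hdec, List.dropWhile_cons, if_pos (by simp [hvn])]
      by_cases hcneg : c < 0
      · -- whole prefix empty: the run list is a single None run, result (-1,-1,-1)
        have hcm1 : c = -1 := by omega
        rw [hcm1, show (-1:Int) + 1 = 0 by ring,
          PySem.List.pyRange_one_eq_nil (le_refl (0:Int))]
        simp only [loopRuns, List.dropWhile_nil]
        rw [hb1, hcm1]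
        norm_num
      · -- prefix ends in a None run preceded by a file run ending at c
        have hc0 : (0:Int) ≤ c := by omega
        have hcstop : (PySem.List.pyGet? blocks c).getD none ≠ v := loopB2_stop blocks v ptr hc0
        have hdec2 := rle_decomp blocks (c + 1).toNat c hc0 (by omega)
        set w : Option Int := (PySem.List.pyGet? blocks c).getD none with hw
        have hwn : w ≠ none := by rw [hvn] at hcstop; exact hcstop
        rw [hdec2, List.dropWhile_cons, if_neg (by simp [Option.isNone_iff_eq_none, hwn])]
        rw [hb1]
        rw [if_neg (by omega)]
    · -- blocks[ptr] is a file block: the head run is kept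
      have hb1 : loopB1 blocks ptr = ptr := by
        rw [loopB1]; exact dif_neg (fun h => hvn (hv.trans h.2))
      rw [hdec, List.dropWhile_cons, if_neg (by simp [Option.isNone_iff_eq_none, hvn])]
      rw [hb1]
      rw [if_neg (by omega)]

-- ===== D_ ↔ the quirk condition, and the endgame =====

theorem getD_bridge (blocks : List (Option Int)) (i : Int) (h : 0 ≤ i) :
    (PySem.List.pyGet? blocks i).getD none = blocks.getD i.toNat none := by
  rw [PySem.List.pyGet?_of_nonneg blocks h]
  rfl

-- inside Pre_, D_ holds exactly when A's two-phase walk hits the quirk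
theorem D_iff_quirk (blocks : List (Option Int)) (ptr : Int)
    (hpre : ptr < (blocks.length : Int)) :
    D_find_last_file_extent blocks ptr ↔
      (0 ≤ loopB1 blocks ptr ∧
        loopB2 blocks ((PySem.List.pyGet? blocks (loopB1 blocks ptr)).getD none)
          (loopB1 blocks ptr) < 0) := by
  constructor
  · rintro ⟨h0, _, k, hkmem, hknn, hkrun, hksuf⟩
    have hk : (k : Int) ≤ ptr := by
      have := List.mem_range.mp hkmem; omega
    have hknn' : (PySem.List.pyGet? blocks (k : Int)).getD none ≠ none := by
      rw [getD_bridge blocks (k : Int) (by omega)]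
      simpa using hknn
    have hb1 : loopB1 blocks ptr = (k : Int) := by
      rw [loopB1_eq]
      apply loopB2_eq_of blocks none ptr (k : Int) (by omega) hk
      · intro j h1 h2
        rw [getD_bridge blocks j (by omega)]
        have := hksuf j.toNat (List.mem_range.mpr (by omega)) (by omega)
        simpa using this
      · right; exact hknn'
    refine ⟨by rw [hb1]; omega, ?_⟩
    rw [hb1]
    have hb2 : loopB2 blocks ((PySem.List.pyGet? blocks (k:Int)).getD none) (k : Int) = -1 := by
      apply loopB2_eq_of blocks _ (k : Int) (-1) le_rfl (by omega)
      · intro j h1 h2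
        rw [getD_bridge blocks j (by omega), getD_bridge blocks (k : Int) (by omega)]
        have := hkrun j.toNat (List.mem_range.mpr (by omega))
        simpa using this
      · left; rfl
    rw [hb2]; omega
  · rintro ⟨he0, hq⟩
    set e := loopB1 blocks ptr with hedef
    have hee : e = loopB2 blocks none ptr := hedef.trans (loopB1_eq blocks ptr)
    have heptr : e ≤ ptr := by rw [hee]; exact loopB2_le blocks none ptr
    have h0 : 0 ≤ ptr := by omega
    set f : Option Int := (PySem.List.pyGet? blocks e).getD none with hf
    have hfm1 : loopB2 blocks f e = -1 := by
      have := loopB2_ge blocks f e (by omega); omega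
    have he0' : 0 ≤ loopB2 blocks none ptr := by rw [← hee]; exact he0
    have hfnn : f ≠ none := by
      have := loopB2_stop blocks none ptr he0'
      rw [← hee] at this
      exact fun hc => this (by rw [← hf, hc])
    have hbe : blocks.getD e.toNat none = f :=
      ((getD_bridge blocks e he0).symm.trans hf.symm)
    refine ⟨h0, hpre, e.toNat, List.mem_range.mpr (by omega), ?_, ?_, ?_⟩
    · rw [hbe]; exact hfnn
    · intro j hj
      have hj' := List.mem_range.mp hj
      have h1 : (PySem.List.pyGet? blocks (j : Int)).getD none = f :=
        loopB2_mem blocks f e (j : Int) (by omega) (by omega)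
      have h2 := getD_bridge blocks (j : Int) (Int.natCast_nonneg j)
      have h3 : blocks.getD j none = f := by
        simpa [Int.toNat_natCast] using h2.symm.trans h1
      rw [h3, hbe]
    · intro j hj hlt
      have hj' := List.mem_range.mp hj
      have h1 : (PySem.List.pyGet? blocks (j : Int)).getD none = none := by
        apply loopB2_mem blocks none ptr (j : Int)
        · rw [← hee]; omega
        · omega
      have h2 := getD_bridge blocks (j : Int) (Int.natCast_nonneg j)
      simpa [Int.toNat_natCast] using h2.symm.trans h1

theorem refA_eq_refB_of_not_quirk (blocks : List (Option Int)) (ptr : Int)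
    (h : ¬ (0 ≤ loopB1 blocks ptr ∧
        loopB2 blocks ((PySem.List.pyGet? blocks (loopB1 blocks ptr)).getD none)
          (loopB1 blocks ptr) < 0)) :
    refA blocks ptr = refB blocks ptr := by
  unfold refA refB
  set e := loopB1 blocks ptr with hedef
  by_cases he : e < 0
  · rw [if_pos he, if_pos he]
  · rw [if_neg he, if_neg he]
    have := not_and.mp h (by omega)
    rw [if_neg this]

-- ===== VERDICT (by name: the statements are the Claim_ definitions above) =====
theorem find_last_file_extent_spec : Claim_unchanged_find_last_file_extent := by
  intro blocks ptr _ hpre hnd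
  rw [A_eq_refA, B_eq_refB]
  exact refA_eq_refB_of_not_quirk blocks ptr (fun h => hnd ((D_iff_quirk blocks ptr hpre).mpr h))

theorem find_last_file_extent_changed : Claim_changed_find_last_file_extent := by
  unfold Claim_changed_find_last_file_extent; decide

theorem find_last_file_extent_tight : Claim_exact_find_last_file_extent := by
  intro blocks ptr _ hpre hd
  obtain ⟨he0, hq⟩ := (D_iff_quirk blocks ptr hpre).mp hd
  rw [A_eq_refA, B_eq_refB]
  unfold refA refB
  dsimp only
  rw [if_neg (show ¬ loopB1 blocks ptr < 0 by omega),
    if_neg (show ¬ loopB1 blocks ptr < 0 by omega), if_pos hq]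
  intro hco
  have h2 := congrArg (fun t : Int × Int × Int => t.2.1) hco
  simp only at h2
  omega
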